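-- pv_equiv track=rewrite | github.com/BrunoFCapri/TrucoArgentinoTerminal | truco.py | valor_envido
-- ===== SOURCE A (Python) =====
-- PALOS_TRUCO = ["Espadas", "Bastos", "Oros", "Copas"]
--
-- def valor_envido(mano):
--     # Suma de dos cartas del mismo palo, 10-12 valen 0
--     valores = []
--     for palo in PALOS_TRUCO:
--         nums = [int(c[1]) if c[1] in ["10","11","12"] else int(c[1]) for c in mano if c[0]==palo]
--         nums = [n if n<10 else 0 for n in nums]
--         if len(nums)>=2:
--             valores.append(sum(sorted(nums)[-2:]))
--         elif len(nums)==1: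
--             valores.append(nums[0])
--     return max(valores) if valores else 0
-- ===== SOURCE B (Python) =====
-- PALOS_TRUCO = ["Espadas", "Bastos", "Oros", "Copas"]
--
-- def valor_envido(mano):
--     # One pass: group card values by suit in a dict, then take the top two of
--     # each group (sorted descending) and keep a running best.
--     grupos = {}
--     for c in mano:
--         if c[0] in PALOS_TRUCO:
--             n = int(c[1])
--             grupos.setdefault(c[0], []).append(n if n < 10 else 0)
--     best = None
--     for vals in grupos.values():
--         s = sorted(vals, reverse=True)
--         pts = s[0] + s[1] if len(s) > 1 else s[0]
--         if best is None or pts > best: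
--             best = pts
--     return best if best is not None else 0
-- ===== Notes on version B (the rewrite author's own statement) =====
-- stated objective: alternative
-- what changed: B replaces A's per-suit passes (one filter of the whole hand per suit, then ascending sort and a [-2:] slice) by a single grouping pass that builds a dict of card values keyed by suit, then takes the top two of each group via a descending sort and keeps a running maximum instead of building a list of candidates and calling max().
import Mathlib
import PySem

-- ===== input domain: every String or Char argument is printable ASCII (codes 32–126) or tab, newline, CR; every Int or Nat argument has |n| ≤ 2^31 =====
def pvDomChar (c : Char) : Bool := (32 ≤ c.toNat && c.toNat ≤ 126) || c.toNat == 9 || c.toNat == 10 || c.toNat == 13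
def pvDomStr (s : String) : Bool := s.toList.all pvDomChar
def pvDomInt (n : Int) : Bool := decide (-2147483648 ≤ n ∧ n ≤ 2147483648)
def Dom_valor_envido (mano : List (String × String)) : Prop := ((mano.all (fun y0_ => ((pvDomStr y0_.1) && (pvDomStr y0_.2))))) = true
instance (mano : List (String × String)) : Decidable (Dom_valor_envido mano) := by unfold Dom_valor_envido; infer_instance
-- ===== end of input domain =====

-- B replaces A's four filter-and-sort passes over the hand by one dict-grouping
-- pass followed by a per-suit top-two scan with a running maximum (objective:
-- alternative decomposition, same asymptotic cost on a 3-card hand).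

def pvPalosTruco : List String := ["Espadas", "Bastos", "Oros", "Copas"]

-- ===== PORT A =====
def valor_envido (mano : List (String × String)) : Int :=
  let valores : List Int := pvPalosTruco.foldl (fun valores palo =>
    let nums : List Int := (mano.filter (fun c => c.1 == palo)).map (fun c =>
      if c.2 ∈ (["10", "11", "12"] : List String) then (PySem.Int.ofStr? c.2).getD 0
      else (PySem.Int.ofStr? c.2).getD 0)   -- int(c[1]); the .getD 0 default is unreachable under Pre_
    let nums := nums.map (fun n => if n < 10 then n else 0)
    if nums.length ≥ 2 then
      valores ++ [(PySem.List.slice (PySem.List.sorted nums (fun n => n)) (some (-2)) none).sum]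
    else if nums.length = 1 then
      valores ++ [PySem.List.pyGetD nums 0 0]
    else valores) []
  (PySem.List.max? valores (fun v => v)).getD 0

-- ===== PORT B =====
def pvCardVal (c : String × String) : Int :=
  let n := (PySem.Int.ofStr? c.2).getD 0   -- int(c[1]); the .getD 0 default is unreachable under Pre_
  if n < 10 then n else 0

def valor_envido_alt (mano : List (String × String)) : Int :=
  let grupos : PySem.Dict String (List Int) := mano.foldl (fun d c =>
    if c.1 ∈ pvPalosTruco then d.modify c.1 [] (fun l => l ++ [pvCardVal c]) else d)
    PySem.Dict.empty
  let best : Option Int := grupos.values.foldl (fun best vals =>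
    let s := PySem.List.sorted vals (fun n => n) true
    let pts := if 1 < s.length then PySem.List.pyGetD s 0 0 + PySem.List.pyGetD s 1 0
               else PySem.List.pyGetD s 0 0   -- s[0], s[1]: in range, every group is nonempty
    match best with
    | none => some pts
    | some m => if pts > m then some pts else some m) none
  best.getD 0

-- ===== PRECONDITION & SPEC =====
-- Pre_ excludes exactly the inputs where Python A raises ValueError: a card whose
-- suit is one of the four truco suits but whose rank string is not a valid int literal.
def Pre_valor_envido (mano : List (String × String)) : Prop :=
  ∀ c ∈ mano, c.1 ∈ pvPalosTruco → (PySem.Int.ofStr? c.2).isSome = true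
instance (mano : List (String × String)) : Decidable (Pre_valor_envido mano) := by
  unfold Pre_valor_envido; infer_instance

def pvWitness_valor_envido : (List (String × String)) :=
  [("Espadas", "7"), ("Espadas", "4"), ("Oros", "11")]

def Spec_valor_envido (mano : List (String × String)) (out : Int) : Prop := out = valor_envido_alt mano
instance (mano : List (String × String)) (out : Int) : Decidable (Spec_valor_envido mano out) := by unfold Spec_valor_envido; infer_instance

-- ===== CLAIM (what is proved, stated in full; the proofs are below) =====
def Claim_equal_valor_envido : Prop := ∀ (mano : List (String × String)), Dom_valor_envido mano → Pre_valor_envido mano → Spec_valor_envido mano (valor_envido mano)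

-- ===== LEMMAS AND PROOFS =====

-- The per-suit value list both programs work with.
def pvNums (mano : List (String × String)) (palo : String) : List Int :=
  (mano.filter (fun c => c.1 == palo)).map pvCardVal

def pvPresent (mano : List (String × String)) (palo : String) : Bool :=
  decide (pvNums mano palo ≠ [])

-- A's per-suit contribution.
def pvContrib (l : List Int) : Int :=
  if 2 ≤ l.length then (PySem.List.slice (PySem.List.sorted l (fun n => n)) (some (-2)) none).sum
  else PySem.List.pyGetD l 0 0

-- B's per-suit contribution.
def pvPts (l : List Int) : Int :=
  let s := PySem.List.sorted l (fun n => n) true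
  if 1 < s.length then PySem.List.pyGetD s 0 0 + PySem.List.pyGetD s 1 0
  else PySem.List.pyGetD s 0 0

-- B's running-maximum step.
def pvStep (b : Option Int) (p : Int) : Option Int :=
  match b with | none => some p | some m => if p > m then some p else some m

def pvGrupos (mano : List (String × String)) : PySem.Dict String (List Int) :=
  mano.foldl (fun d c =>
    if c.1 ∈ pvPalosTruco then d.modify c.1 [] (fun l => l ++ [pvCardVal c]) else d)
    PySem.Dict.empty

def pvPairs (mano : List (String × String)) : List (String × Int) :=
  (mano.filter (fun c => decide (c.1 ∈ pvPalosTruco))).map (fun c => (c.1, pvCardVal c))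

lemma pvSorted_rev_eq (l : List Int) :
    PySem.List.sorted l (fun n => n) true = (PySem.List.sorted l (fun n => n) false).reverse := by
  have h1 : PySem.List.sorted l (fun n => n) false = (PySem.List.sorted l (fun n => n) true).reverse := by
    apply PySem.List.sorted_id_eq_of_perm_of_pairwise
    · exact (List.reverse_perm _).trans (PySem.List.sorted_perm l _ true)
    · rw [List.pairwise_reverse]
      exact PySem.List.sorted_pairwise_rev l (fun n => n)
  rw [h1, List.reverse_reverse]

lemma pvPts_eq_contrib (l : List Int) (h : l ≠ []) : pvPts l = pvContrib l := by
  unfold pvPts pvContrib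
  have hlen : l.length ≠ 0 := fun e => h (List.length_eq_zero_iff.mp e)
  by_cases h2 : 2 ≤ l.length
  · set s := PySem.List.sorted l (fun n => n) false with hs
    have hlens : s.length = l.length := PySem.List.length_sorted l _ false
    rw [pvSorted_rev_eq l, if_pos (by simpa [hlens] using h2), if_pos h2, ← hs]
    have h0 : (0 : Nat) < s.reverse.length := by simp [hlens]; omega
    have h1 : (1 : Nat) < s.reverse.length := by simp [hlens]; omega
    rw [PySem.List.pyGetD_ofNat' s.reverse 0 0, PySem.List.pyGetD_ofNat' s.reverse 1 0]
    rw [List.getD_eq_getElem s.reverse 0 h0, List.getD_eq_getElem s.reverse 0 h1]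
    rw [List.getElem_reverse h0, List.getElem_reverse h1]
    rw [PySem.List.slice_from_neg_ofNat s 2 (by omega)]
    rw [List.drop_eq_getElem_cons (by omega : s.length - 2 < s.length)]
    rw [show s.length - 2 + 1 = s.length - 1 by omega]
    rw [List.drop_eq_getElem_cons (by omega : s.length - 1 < s.length)]
    rw [show s.length - 1 + 1 = s.length by omega, List.drop_length]
    simp only [List.sum_cons, List.sum_nil]
    have e1 : s.length - 1 - 0 = s.length - 1 := by omega
    have e2 : s.length - 1 - 1 = s.length - 2 := by omega
    simp only [e1, e2]
    ring
  · have h1 : l.length = 1 := by omega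
    obtain ⟨a, rfl⟩ := List.length_eq_one_iff.mp h1
    have hsr : PySem.List.sorted [a] (fun n : Int => n) true = [a] :=
      PySem.List.sorted_rev_eq_self_of_pairwise [a] _ (List.pairwise_singleton _ _)
    rw [hsr, if_neg (by simp), if_neg (by simp)]

lemma pvGrupos_eq (mano : List (String × String)) :
    pvGrupos mano = (pvPairs mano).foldl (fun d p => d.modify p.1 [] (fun l => l ++ [p.2])) PySem.Dict.empty := by
  unfold pvGrupos pvPairs
  rw [List.foldl_map, List.foldl_filter]
  congr 1
  funext d c
  by_cases hc : c.1 ∈ pvPalosTruco <;> simp [hc]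

lemma pvGrupos_getD (mano : List (String × String)) (palo : String) (hp : palo ∈ pvPalosTruco) :
    (pvGrupos mano).getD palo [] = pvNums mano palo := by
  rw [pvGrupos_eq, PySem.Dict.getD_foldl_modify_append]
  rw [PySem.Dict.getD_empty, List.nil_append]
  unfold pvPairs pvNums
  rw [List.filter_map, List.map_map, List.filter_filter]
  simp only [Function.comp_def]
  have hf : ∀ c ∈ mano, (((c.1 == palo) : Bool) && decide (c.1 ∈ pvPalosTruco)) = (c.1 == palo) := by
    intro c _
    by_cases hc : c.1 = palo
    · simp [hc, hp]
    · simp [hc]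
  rw [List.filter_congr hf]

lemma pvGrupos_keys (mano : List (String × String)) :
    (pvGrupos mano).keys = PySem.Set.ofList ((pvPairs mano).map (fun p => p.1)) := by
  rw [pvGrupos_eq]
  rw [PySem.Dict.keys_foldl_modify_key (pvPairs mano) (fun p : String × Int => p.1) ([] : List Int)
    (fun _ p => fun l => l ++ [p.2]) PySem.Dict.empty]
  rfl

lemma pvGrupos_keys_nodup (mano : List (String × String)) : (pvGrupos mano).keys.Nodup := by
  rw [pvGrupos_eq]
  exact PySem.Dict.nodup_keys_foldl_modify_key _ (fun p : String × Int => p.1) []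
    (fun _ p => fun l => l ++ [p.2]) _ (by simp)

lemma pvMem_keys_iff (mano : List (String × String)) (k : String) :
    k ∈ (pvGrupos mano).keys ↔ k ∈ pvPalosTruco ∧ pvNums mano k ≠ [] := by
  rw [pvGrupos_keys, PySem.Set.mem_ofList]
  unfold pvPairs pvNums
  simp only [List.map_map, List.mem_map, List.mem_filter, Function.comp_def, decide_eq_true_eq,
    ne_eq, List.map_eq_nil_iff, List.filter_eq_nil_iff, not_forall]
  constructor
  · rintro ⟨c, ⟨hcm, hcp⟩, rfl⟩
    exact ⟨hcp, ⟨c, hcm, by simp⟩⟩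
  · rintro ⟨hkp, c, hcm, hck⟩
    refine ⟨c, ⟨hcm, ?_⟩, ?_⟩
    · simpa using (by simpa using hck : c.1 = k) ▸ hkp
    · simpa using hck

lemma pvMaxFold (t : List Int) (x : Int) :
    t.foldl pvStep (some x) = some (t.foldl max x) := by
  induction t generalizing x with
  | nil => rfl
  | cons v t ih =>
    simp only [List.foldl_cons, ← ih]
    congr 1
    simp only [pvStep]
    by_cases hvx : x < v
    · rw [if_pos hvx, max_eq_right hvx.le]
    · rw [if_neg hvx, max_eq_left (by omega)]

lemma pvFold_eq_max? (M : List Int) :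
    M.foldl pvStep none = PySem.List.max? M (fun v => v) := by
  cases M with
  | nil => rfl
  | cons x t =>
    rw [PySem.List.max?_id_cons]
    simpa using pvMaxFold t x

lemma pvMax?_id_perm (L1 L2 : List Int) (h : L1.Perm L2) :
    PySem.List.max? L1 (fun v => v) = PySem.List.max? L2 (fun v => v) := by
  cases hL1 : PySem.List.max? L1 (fun v => v) with
  | none =>
    rw [PySem.List.max?_eq_none_iff] at hL1
    subst hL1
    rw [eq_comm, PySem.List.max?_eq_none_iff]
    exact h.nil_eq.symm
  | some m1 =>
    cases hL2 : PySem.List.max? L2 (fun v => v) with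
    | none =>
      rw [PySem.List.max?_eq_none_iff] at hL2
      subst hL2
      rw [(PySem.List.max?_eq_none_iff L1 (fun v => v)).mpr h.eq_nil] at hL1
      exact hL1.symm ▸ rfl
    | some m2 =>
      have h1 := PySem.List.max?_mem hL1
      have h2 := PySem.List.max?_mem hL2
      have hle1 := PySem.List.max?_isMax hL2 m1 (h.mem_iff.mp h1)
      have hle2 := PySem.List.max?_isMax hL1 m2 (h.mem_iff.mpr h2)
      simp only [Option.some.injEq]
      exact le_antisymm hle1 hle2

lemma pvA_eq (mano : List (String × String)) :
    valor_envido mano =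
      (PySem.List.max? ((pvPalosTruco.filter (pvPresent mano)).map
        (fun palo => pvContrib (pvNums mano palo))) (fun v => v)).getD 0 := by
  unfold valor_envido
  have hstep : (fun (valores : List Int) palo =>
      let nums : List Int := (mano.filter (fun c => c.1 == palo)).map (fun c =>
        if c.2 ∈ (["10", "11", "12"] : List String) then (PySem.Int.ofStr? c.2).getD 0
        else (PySem.Int.ofStr? c.2).getD 0)
      let nums := nums.map (fun n => if n < 10 then n else 0)
      if nums.length ≥ 2 then
        valores ++ [(PySem.List.slice (PySem.List.sorted nums (fun n => n)) (some (-2)) none).sum]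
      else if nums.length = 1 then
        valores ++ [PySem.List.pyGetD nums 0 0]
      else valores) =
      (fun valores palo =>
        if pvPresent mano palo = true then valores ++ [pvContrib (pvNums mano palo)] else valores) := by
    funext acc palo
    have hn : ((mano.filter (fun c => c.1 == palo)).map (fun c =>
        if c.2 ∈ (["10", "11", "12"] : List String) then (PySem.Int.ofStr? c.2).getD 0
        else (PySem.Int.ofStr? c.2).getD 0)).map (fun n => if n < 10 then n else 0)
        = pvNums mano palo := by
      simp only [ite_self, List.map_map]
      rfl
    dsimp only
    rw [hn]
    by_cases hp2 : 2 ≤ (pvNums mano palo).length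
    · have hpr : pvPresent mano palo = true := by
        simp only [pvPresent, decide_eq_true_eq]
        exact List.ne_nil_of_length_pos (by omega)
      rw [if_pos hp2, if_pos hpr]
      unfold pvContrib
      rw [if_pos hp2]
    · by_cases hp1 : (pvNums mano palo).length = 1
      · have hpr : pvPresent mano palo = true := by
          simp only [pvPresent, decide_eq_true_eq]
          exact List.ne_nil_of_length_pos (by omega)
        rw [if_neg hp2, if_pos hp1, if_pos hpr]
        unfold pvContrib
        rw [if_neg hp2]
      · have hnil : pvNums mano palo = [] := by
          have : (pvNums mano palo).length = 0 := by omega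
          exact List.length_eq_zero_iff.mp this
        have hpr : pvPresent mano palo = false := by
          simp [pvPresent, hnil]
        rw [if_neg hp2, if_neg hp1, if_neg (by simp [hpr])]
  rw [hstep, PySem.List.foldl_append_if (pvPresent mano)
    (fun palo => pvContrib (pvNums mano palo)) pvPalosTruco []]
  rw [List.nil_append]

lemma pvB_eq (mano : List (String × String)) :
    valor_envido_alt mano =
      (PySem.List.max? ((pvGrupos mano).keys.map
        (fun k => pvContrib (pvNums mano k))) (fun v => v)).getD 0 := by
  have hB : valor_envido_alt mano =
      ((pvGrupos mano).values.foldl (fun b vals => pvStep b (pvPts vals)) none).getD 0 := rfl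
  rw [hB, PySem.Dict.values_eq_map_keys _ (pvGrupos_keys_nodup mano) ([] : List Int)]
  rw [List.foldl_map]
  rw [PySem.List.foldl_congr_mem (l := (pvGrupos mano).keys)
    (h := by
      intro acc k hk
      obtain ⟨hkp, hkne⟩ := (pvMem_keys_iff mano k).mp hk
      show pvStep acc (pvPts ((pvGrupos mano).getD k [])) = pvStep acc (pvContrib (pvNums mano k))
      rw [pvGrupos_getD mano k hkp, pvPts_eq_contrib _ hkne])]
  rw [← List.foldl_map (f := fun k => pvContrib (pvNums mano k)) (g := pvStep)]
  rw [pvFold_eq_max?]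

-- ===== VERDICT (by name: the statement is the Claim_ definition above) =====
theorem valor_envido_spec : Claim_equal_valor_envido := by
  intro mano _ _
  unfold Spec_valor_envido
  rw [pvA_eq, pvB_eq]
  congr 1
  apply pvMax?_id_perm
  apply List.Perm.map
  rw [List.perm_ext_iff_of_nodup ((by decide : pvPalosTruco.Nodup).filter _) (pvGrupos_keys_nodup mano)]
  intro k
  rw [List.mem_filter, pvMem_keys_iff]
  simp [pvPresent]
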